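-- pv_equiv track=rewrite | github.com/Tuhct/DataMining | ex.py | freq_itemset
-- ===== SOURCE A (Python) =====
-- def freq_itemset(dataset,a,min_freq):
--     cut_branch={}
--
--     for i in a:
--         for j in dataset:
--             if set(i).issubset(set(j)):
--                 # 判断集合的所有元素是否都包含在指定集合中
--                 cut_branch[tuple(i)]=cut_branch.get(tuple(i),0)+1
--                 # 通过tuple函数将字典转化为元组，保留键值，通过get获取其键的值
--                 # 剪枝法，将元素加入字典中并统计出现的次数。
--     Lk=[]
--     L1={}
--
--     for i in cut_branch:
--         if cut_branch[i]>=min_freq: # 当支持度大于最小阈值：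
--             Lk.append(list(i))
--             # 频繁项集
--             L1[i]=cut_branch[i]
--             # L1用于存储存放所有频繁项集的支持度
--
--     return L1,Lk
-- ===== SOURCE B (Python) =====
-- def freq_itemset(dataset, a, min_freq):
--     # Inverted index: item -> set of transaction indices containing it.
--     index = {}
--     for j, t in enumerate(dataset):
--         for item in t:
--             s = index.get(item)
--             if s is None:
--                 index[item] = {j}
--             else:
--                 s.add(j)
--     counts = {}
--     for i in a:
--         tids = None
--         for item in i:
--             s = index.get(item, set())
--             tids = set(s) if tids is None else (tids & s)
--             if not tids:
--                 break
--         support = len(dataset) if tids is None else len(tids)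
--         if support:
--             k = tuple(i)
--             counts[k] = counts.get(k, 0) + support
--     Lk = []
--     L1 = {}
--     for k, c in counts.items():
--         if c >= min_freq:
--             Lk.append(list(k))
--             L1[k] = c
--     return L1, Lk
-- ===== Notes on version B (the rewrite author's own statement) =====
-- stated objective: faster
-- what changed: Replaces A's nested candidate-by-transaction subset scan (rebuilding set(i) and set(j) for every pair) with a one-pass inverted index (item -> set of transaction indices) and computes each candidate's support as the size of the intersection of its items' tidsets, with early exit on an empty intersection.
import Mathlib
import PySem

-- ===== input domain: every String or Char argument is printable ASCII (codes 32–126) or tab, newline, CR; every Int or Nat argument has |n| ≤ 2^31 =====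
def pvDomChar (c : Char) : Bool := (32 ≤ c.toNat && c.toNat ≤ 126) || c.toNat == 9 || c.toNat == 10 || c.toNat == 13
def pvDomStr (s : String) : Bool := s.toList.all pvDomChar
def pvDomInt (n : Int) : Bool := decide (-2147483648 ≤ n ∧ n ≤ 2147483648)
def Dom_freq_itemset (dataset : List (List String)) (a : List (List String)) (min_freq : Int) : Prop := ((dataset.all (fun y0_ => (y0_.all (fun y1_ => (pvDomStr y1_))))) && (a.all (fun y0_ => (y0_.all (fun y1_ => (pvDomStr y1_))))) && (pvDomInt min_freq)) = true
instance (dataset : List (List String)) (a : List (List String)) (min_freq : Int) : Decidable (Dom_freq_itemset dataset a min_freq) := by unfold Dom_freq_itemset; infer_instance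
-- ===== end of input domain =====

-- B replaces A's nested candidate×transaction subset scan by a one-pass inverted index
-- (item -> tidset) and per-candidate tidset intersection; same return value; measurably faster on the generated timing inputs.


-- ===== PORT A =====
-- for i in a: for j in dataset: if set(i).issubset(set(j)): cut_branch[tuple(i)] = get(...)+1
-- then the filter loop building Lk and L1; returns (L1, Lk).
def freq_itemset (dataset : List (List String)) (a : List (List String)) (min_freq : Int) : (List (List String × Int)) × List (List String) :=
  let cut_branch : PySem.Dict (List String) Int :=
    a.foldl (fun d i =>
      dataset.foldl (fun d j =>
        if i.all (fun x => j.contains x) then d.insert i (d.getD i 0 + 1) else d) d)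
      PySem.Dict.empty
  let fin := cut_branch.items.foldl
    (fun (p : List (List String) × PySem.Dict (List String) Int) kv =>
      if kv.2 ≥ min_freq then (p.1 ++ [kv.1], p.2.insert kv.1 kv.2) else p)
    ([], PySem.Dict.empty)
  (fin.2.items, fin.1)

-- ===== PORT B =====
-- index.get(item) is None -> index[item] = {j} ; else s.add(j)
def fiIndexStep (j : Int) (d : PySem.Dict String (PySem.Set Int)) (item : String) : PySem.Dict String (PySem.Set Int) :=
  match d.get? item with
  | none => d.insert item (PySem.Set.ofList [j])
  | some s => d.insert item (PySem.Set.add s j)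

-- for j, t in enumerate(dataset): for item in t: ...
def fiIndex : List (List String) → Int → PySem.Dict String (PySem.Set Int) → PySem.Dict String (PySem.Set Int)
  | [], _, d => d
  | t :: rest, j, d => fiIndex rest (j + 1) (t.foldl (fiIndexStep j) d)

-- the inner candidate loop after the first item: tids = tids & s; if not tids: break
def fiGo (idx : PySem.Dict String (PySem.Set Int)) : List String → PySem.Set Int → Int
  | [], tids => (tids.length : Int)
  | item :: rest, tids =>
      let t2 := PySem.Set.inter tids (idx.getD item [])
      if t2.isEmpty then 0 else fiGo idx rest t2

-- support of one candidate: len(dataset) for the empty candidate, else intersect tidsets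
def fiSupport (idx : PySem.Dict String (PySem.Set Int)) (n : Int) : List String → Int
  | [] => n
  | item :: rest =>
      let t := idx.getD item []
      if t.isEmpty then 0 else fiGo idx rest t

def freq_itemset_alt (dataset : List (List String)) (a : List (List String)) (min_freq : Int) : (List (List String × Int)) × List (List String) :=
  let idx := fiIndex dataset 0 PySem.Dict.empty
  let counts : PySem.Dict (List String) Int :=
    a.foldl (fun d i =>
      let support := fiSupport idx (dataset.length : Int) i
      if support ≠ 0 then d.insert i (d.getD i 0 + support) else d)
      PySem.Dict.empty
  let fin := counts.items.foldl
    (fun (p : List (List String) × PySem.Dict (List String) Int) kv =>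
      if kv.2 ≥ min_freq then (p.1 ++ [kv.1], p.2.insert kv.1 kv.2) else p)
    ([], PySem.Dict.empty)
  (fin.2.items, fin.1)

-- ===== PRECONDITION & SPEC =====
def Spec_freq_itemset (dataset : List (List String)) (a : List (List String)) (min_freq : Int) (out : (List (List String × Int)) × List (List String)) : Prop := out = freq_itemset_alt dataset a min_freq
instance (dataset : List (List String)) (a : List (List String)) (min_freq : Int) (out : (List (List String × Int)) × List (List String)) : Decidable (Spec_freq_itemset dataset a min_freq out) := by unfold Spec_freq_itemset; infer_instance

-- ===== CLAIM (what is proved, stated in full; the proofs are below) =====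
def Claim_equal_freq_itemset : Prop := ∀ (dataset : List (List String)) (a : List (List String)) (min_freq : Int), Dom_freq_itemset dataset a min_freq → Spec_freq_itemset dataset a min_freq (freq_itemset dataset a min_freq)

-- ===== LEMMAS AND PROOFS =====

-- "set(i) ⊆ set(j)" as a predicate on transactions
def subT (i t : List String) : Bool := i.all (fun x => t.contains x)

-- the indices (from j on) of transactions of ds containing all items of i
def tidsOf : List (List String) → Int → List String → List Int
  | [], _, _ => []
  | t :: rest, j, i => (if subT i t then [j] else []) ++ tidsOf rest (j + 1) i

theorem le_of_mem_tidsOf (ds : List (List String)) (j : Int) (i : List String) :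
    ∀ x ∈ tidsOf ds j i, j ≤ x := by
  induction ds generalizing j with
  | nil => simp [tidsOf]
  | cons t rest ih =>
    intro x hx
    simp only [tidsOf, List.mem_append] at hx
    rcases hx with hx | hx
    · split at hx <;> simp_all
    · have := ih (j + 1) x hx; omega

theorem length_tidsOf (ds : List (List String)) (j : Int) (i : List String) :
    (tidsOf ds j i).length = ds.countP (subT i) := by
  induction ds generalizing j with
  | nil => simp [tidsOf]
  | cons t rest ih =>
    simp only [tidsOf, List.length_append, List.countP_cons, ih]
    split <;> simp_all <;> omega

theorem transStep_getD (j : Int) (t : List String) (d : PySem.Dict String (PySem.Set Int)) (item : String) :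
    (t.foldl (fiIndexStep j) d).getD item [] =
      if t.contains item = true ∧ j ∉ d.getD item [] then d.getD item [] ++ [j] else d.getD item [] := by
  induction t generalizing d with
  | nil => simp
  | cons it0 t' ih =>
    have hstep : (fiIndexStep j d it0).getD item [] =
        if item = it0 then
          (if j ∈ d.getD it0 [] then d.getD it0 [] else d.getD it0 [] ++ [j])
        else d.getD item [] := by
      unfold fiIndexStep
      cases hg : d.get? it0 with
      | none =>
        have h0 : d.getD it0 [] = [] := by simp [PySem.Dict.getD_eq_get?_getD, hg]
        simp [PySem.Dict.getD_insert, PySem.Set.ofList, PySem.Set.add, h0]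
      | some s =>
        have h0 : d.getD it0 [] = s := by simp [PySem.Dict.getD_eq_get?_getD, hg]
        simp only [PySem.Dict.getD_insert, h0]
        have hadd : PySem.Set.add s j = if j ∈ s then s else s ++ [j] := by
          show (if s.contains j then s else s ++ [j]) = _
          by_cases hj : j ∈ s <;> simp [hj]
        rw [hadd]
    rw [List.foldl_cons, ih, hstep]
    by_cases he : item = it0
    · rw [if_pos he]; subst he
      by_cases hj : j ∈ d.getD item []
      · rw [if_pos hj, if_neg (fun h => h.2 hj), if_neg (fun h => h.2 hj)]
      · rw [if_neg hj,
          if_neg (show ¬(t'.contains item = true ∧ j ∉ d.getD item [] ++ [j]) from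
            fun h => h.2 (by simp)),
          if_pos (show ((item :: t').contains item = true ∧ j ∉ d.getD item []) from
            ⟨by simp [List.contains_eq_mem], hj⟩)]
    · rw [if_neg he]
      have hc : ((it0 :: t').contains item) = t'.contains item := by
        simp [List.contains_eq_mem, List.mem_cons, he]
      rw [hc]

theorem fiIndex_getD (ds : List (List String)) (j : Int) (d : PySem.Dict String (PySem.Set Int))
    (hfresh : ∀ it : String, ∀ x ∈ d.getD it [], x < j) (item : String) :
    (fiIndex ds j d).getD item [] = d.getD item [] ++ tidsOf ds j [item] := by
  induction ds generalizing j d with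
  | nil => simp [fiIndex, tidsOf]
  | cons t rest ih =>
    simp only [fiIndex, tidsOf]
    have hfresh' : ∀ it : String, ∀ x ∈ (t.foldl (fiIndexStep j) d).getD it [], x < j + 1 := by
      intro it x hx
      rw [transStep_getD] at hx
      split at hx
      · rcases List.mem_append.1 hx with hx | hx
        · have := hfresh it x hx; omega
        · simp at hx; omega
      · have := hfresh it x hx; omega
    rw [ih (j + 1) _ hfresh']
    rw [transStep_getD]
    have hnj : j ∉ d.getD item [] := fun h => by have := hfresh item j h; omega
    have hsub : subT [item] t = t.contains item := by simp [subT]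
    by_cases hc : t.contains item = true
    · rw [if_pos ⟨hc, hnj⟩, hsub, if_pos hc, List.append_assoc]
    · have : ¬ (t.contains item = true ∧ j ∉ d.getD item []) := fun h => hc h.1
      rw [if_neg this, hsub, if_neg hc, List.nil_append]

theorem idx_getD (ds : List (List String)) (item : String) :
    (fiIndex ds 0 PySem.Dict.empty).getD item [] = tidsOf ds 0 [item] := by
  rw [fiIndex_getD ds 0 PySem.Dict.empty (by simp) item]
  simp

theorem subT_append (p q : List String) (t : List String) :
    subT (p ++ q) t = (subT p t && subT q t) := by
  simp [subT, List.all_append]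

theorem tidsOf_inter (ds : List (List String)) (j : Int) (p : List String) (item : String) :
    PySem.Set.inter (tidsOf ds j p) (tidsOf ds j [item]) = tidsOf ds j (p ++ [item]) := by
  induction ds generalizing j with
  | nil => rfl
  | cons t rest ih =>
    show ((if subT p t then [j] else []) ++ tidsOf rest (j + 1) p).filter
        (fun x => ((if subT [item] t then [j] else []) ++ tidsOf rest (j + 1) [item]).contains x)
      = (if subT (p ++ [item]) t then [j] else []) ++ tidsOf rest (j + 1) (p ++ [item])
    rw [List.filter_append]
    have ih' : (tidsOf rest (j + 1) p).filter
        (fun x => (tidsOf rest (j + 1) [item]).contains x) = tidsOf rest (j + 1) (p ++ [item]) :=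
      ih (j + 1)
    have h2 : (tidsOf rest (j + 1) p).filter
        (fun x => ((if subT [item] t then [j] else []) ++ tidsOf rest (j + 1) [item]).contains x)
        = tidsOf rest (j + 1) (p ++ [item]) := by
      rw [← ih']
      apply List.filter_congr
      intro x hx
      have hxge : j + 1 ≤ x := le_of_mem_tidsOf _ _ _ x hx
      have hxj : x ≠ j := by omega
      by_cases hi : subT [item] t = true <;>
        simp [hi, List.contains_eq_mem, hxj]
    have hnot : j ∉ tidsOf rest (j + 1) [item] := fun h => by
      have := le_of_mem_tidsOf _ _ _ j h; omega
    have h1 : ((if subT p t then [j] else []) : List Int).filter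
        (fun x => ((if subT [item] t then [j] else []) ++ tidsOf rest (j + 1) [item]).contains x)
        = (if subT (p ++ [item]) t then [j] else []) := by
      rw [subT_append]
      by_cases hp : subT p t = true
      · by_cases hi : subT [item] t = true <;>
          simp [hp, hi, List.contains_eq_mem, hnot]
      · simp [hp]
    rw [h1, h2]

theorem countP_zero_of_sub (ds : List (List String)) (p q : List String)
    (hsub : ∀ x ∈ p, x ∈ q) (h0 : ds.countP (subT p) = 0) : ds.countP (subT q) = 0 := by
  rw [List.countP_eq_zero] at *
  intro t ht hq
  apply h0 t ht
  simp only [subT, List.all_eq_true] at *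
  intro x hx
  exact hq x (hsub x hx)

theorem fiGo_eq (ds : List (List String)) (rest : List String) (p : List String) :
    fiGo (fiIndex ds 0 PySem.Dict.empty) rest (tidsOf ds 0 p)
      = (ds.countP (subT (p ++ rest)) : Int) := by
  induction rest generalizing p with
  | nil => simp [fiGo, length_tidsOf]
  | cons item r' ih =>
    simp only [fiGo, idx_getD, tidsOf_inter]
    by_cases he : (tidsOf ds 0 (p ++ [item])).isEmpty = true
    · rw [if_pos he]
      have h0 : ds.countP (subT (p ++ [item])) = 0 := by
        have := length_tidsOf ds 0 (p ++ [item])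
        rw [List.isEmpty_iff_length_eq_zero] at he
        omega
      have : ds.countP (subT (p ++ item :: r')) = 0 := by
        apply countP_zero_of_sub ds (p ++ [item]) _ _ h0
        intro x hx; simp at hx ⊢; tauto
      simp [this]
    · rw [if_neg he, ih (p ++ [item]), List.append_assoc]
      rfl

theorem fiSupport_eq (ds : List (List String)) (i : List String) :
    fiSupport (fiIndex ds 0 PySem.Dict.empty) (ds.length : Int) i
      = (ds.countP (subT i) : Int) := by
  cases i with
  | nil =>
    simp only [fiSupport]
    have : subT [] = fun _ : List String => true := by funext t; simp [subT]
    rw [this]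
    simp
  | cons item rest =>
    simp only [fiSupport, idx_getD]
    by_cases he : (tidsOf ds 0 [item]).isEmpty = true
    · rw [if_pos he]
      have h0 : ds.countP (subT [item]) = 0 := by
        have := length_tidsOf ds 0 [item]
        rw [List.isEmpty_iff_length_eq_zero] at he
        omega
      have : ds.countP (subT (item :: rest)) = 0 := by
        apply countP_zero_of_sub ds [item] _ _ h0
        intro x hx; simp at hx; simp [hx]
      simp [this]
    · rw [if_neg he]
      have := fiGo_eq ds rest [item]
      simpa using this

theorem innerFoldA (ds : List (List String)) (i : List String) (d : PySem.Dict (List String) Int) :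
    ds.foldl (fun d j => if i.all (fun x => j.contains x) then d.insert i (d.getD i 0 + 1) else d) d
      = if ds.countP (subT i) = 0 then d else d.insert i (d.getD i 0 + (ds.countP (subT i) : Int)) := by
  induction ds generalizing d with
  | nil => simp
  | cons t rest ih =>
    simp only [List.foldl_cons]
    by_cases hs : subT i t = true
    · have hs' : i.all (fun x => t.contains x) = true := hs
      rw [if_pos hs', ih]
      have hc : (t :: rest).countP (subT i) = rest.countP (subT i) + 1 := by
        simp [hs]
      rw [hc]
      by_cases h0 : rest.countP (subT i) = 0
      · rw [if_pos h0, h0, if_neg (by omega)]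
        norm_num
      · rw [if_neg h0, if_neg (by omega)]
        rw [PySem.Dict.insert_insert_self, PySem.Dict.getD_insert_self]
        congr 1
        push_cast
        ring
    · have hs' : ¬ i.all (fun x => t.contains x) = true := hs
      rw [if_neg hs', ih]
      have hc : (t :: rest).countP (subT i) = rest.countP (subT i) := by
        simp [Bool.eq_false_iff.mpr hs]
      rw [hc]

theorem counts_eq (dataset a : List (List String)) :
    a.foldl (fun d i =>
        dataset.foldl (fun d j =>
          if i.all (fun x => j.contains x) then d.insert i (d.getD i 0 + 1) else d) d)
      PySem.Dict.empty
    = a.foldl (fun d i =>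
        let support := fiSupport (fiIndex dataset 0 PySem.Dict.empty) (dataset.length : Int) i
        if support ≠ 0 then d.insert i (d.getD i 0 + support) else d)
      PySem.Dict.empty := by
  have hf : (fun (d : PySem.Dict (List String) Int) (i : List String) =>
        dataset.foldl (fun d j =>
          if i.all (fun x => j.contains x) then d.insert i (d.getD i 0 + 1) else d) d)
      = (fun (d : PySem.Dict (List String) Int) (i : List String) =>
        let support := fiSupport (fiIndex dataset 0 PySem.Dict.empty) (dataset.length : Int) i
        if support ≠ 0 then d.insert i (d.getD i 0 + support) else d) := by
    funext d i
    show _ = (if fiSupport (fiIndex dataset 0 PySem.Dict.empty) (dataset.length : Int) i ≠ 0 then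
        d.insert i (d.getD i 0 + fiSupport (fiIndex dataset 0 PySem.Dict.empty) (dataset.length : Int) i)
      else d)
    rw [innerFoldA, fiSupport_eq]
    by_cases h0 : dataset.countP (subT i) = 0
    · simp [h0]
    · rw [if_neg h0, if_pos (by exact_mod_cast h0)]
  rw [hf]

-- ===== VERDICT (by name: the statement is the Claim_ definition above) =====
theorem freq_itemset_spec : Claim_equal_freq_itemset := by
  intro dataset a min_freq _
  unfold Spec_freq_itemset freq_itemset freq_itemset_alt
  rw [counts_eq]
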